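-- pv_equiv track=rewrite | github.com/NayanPuniya/Plivo_ML_Assignment | Plivo_ML_assignment/src/rules.py | words_to_digits
-- ===== SOURCE A (Python) =====
-- from typing import List, Optional, Tuple
--
-- NUM_WORD = {
--     'zero':'0','oh':'0','o':'0',
--     'one':'1','two':'2','three':'3','four':'4','five':'5',
--     'six':'6','seven':'7','eight':'8','nine':'9'
-- }
--
-- def words_to_digits(seq: List[str]) -> str:
--     """
--     Convert a short sequence of word tokens (like ['double','nine','one']) into
--     digits: '991' or '' if nothing convertible.
--     """
--     out = []
--     i = 0
--     while i < len(seq):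
--         tok = seq[i].lower()
--         if tok in ('double','triple') and i + 1 < len(seq):
--             times = 2 if tok == 'double' else 3
--             nxt = seq[i+1].lower()
--             if nxt in NUM_WORD:
--                 out.append(NUM_WORD[nxt] * times)
--                 i += 2
--                 continue
--         if tok in NUM_WORD:
--             out.append(NUM_WORD[tok])
--             i += 1
--             continue
--         # not a numeric token: stop trying further for this window
--         break
--     return ''.join(out)
-- ===== SOURCE B (Python) =====
-- NUM_WORD = {
--     'zero':'0','oh':'0','o':'0',
--     'one':'1','two':'2','three':'3','four':'4','five':'5',
--     'six':'6','seven':'7','eight':'8','nine':'9'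
-- }
--
-- def words_to_digits(seq):
--     out = []
--     multiplier = 1
--     for t in seq:
--         tok = t.lower()
--         if tok in NUM_WORD:
--             out.append(NUM_WORD[tok] * multiplier)
--             multiplier = 1
--         elif multiplier == 1 and tok in ('double', 'triple'):
--             multiplier = 2 if tok == 'double' else 3
--         else:
--             break
--     return ''.join(out)
-- ===== Notes on version B (the rewrite author's own statement) =====
-- stated objective: simpler
-- what changed: Replaced A's index-based while loop with two-token lookahead (seq[i], seq[i+1]) by a single forward for-loop over the tokens that threads a pending-multiplier state, appending digit*multiplier when a number word is seen and breaking otherwise.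
import Mathlib
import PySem

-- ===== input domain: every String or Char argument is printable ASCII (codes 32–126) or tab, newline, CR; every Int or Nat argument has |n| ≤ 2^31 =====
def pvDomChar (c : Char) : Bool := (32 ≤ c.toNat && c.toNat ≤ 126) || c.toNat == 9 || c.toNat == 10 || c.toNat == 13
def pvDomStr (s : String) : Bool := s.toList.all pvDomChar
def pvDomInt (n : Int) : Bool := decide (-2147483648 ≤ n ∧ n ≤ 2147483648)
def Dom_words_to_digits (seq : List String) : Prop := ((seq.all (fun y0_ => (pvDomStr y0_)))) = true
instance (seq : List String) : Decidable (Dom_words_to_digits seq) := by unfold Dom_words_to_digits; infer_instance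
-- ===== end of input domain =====

-- B replaces A's index-based while loop with lookahead by a single forward pass threading a
-- pending-multiplier state (objective: simpler; same O(n) cost).

-- ===== PORT A =====
def NUM_WORD : PySem.Dict String String := PySem.Dict.ofList
  [("zero","0"),("oh","0"),("o","0"),("one","1"),("two","2"),("three","3"),("four","4"),
   ("five","5"),("six","6"),("seven","7"),("eight","8"),("nine","9")]

-- Python's 's * n' on a string, ported by hand: n concatenated copies of s (exact)
def strMul (s : String) (n : Nat) : String := PySem.Str.join "" (List.replicate n s)

-- the while loop of A: i-as-suffix, out-as-acc
def wordsToDigitsGo (acc : List String) : List String → List String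
  | [] => acc
  | t :: rest =>
    let tok := PySem.Str.lower t
    if tok == "double" || tok == "triple" then
      match rest with
      | nxt0 :: rest2 =>
        let times : Nat := if tok == "double" then 2 else 3
        let nxt := PySem.Str.lower nxt0
        match NUM_WORD.get? nxt with
        | some d => wordsToDigitsGo (acc ++ [strMul d times]) rest2
        | none =>
          match NUM_WORD.get? tok with
          | some d => wordsToDigitsGo (acc ++ [d]) (nxt0 :: rest2)
          | none => acc
      | [] =>
        match NUM_WORD.get? tok with
        | some d => wordsToDigitsGo (acc ++ [d]) []
        | none => acc
    else
      match NUM_WORD.get? tok with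
      | some d => wordsToDigitsGo (acc ++ [d]) rest
      | none => acc

termination_by l => l.length
decreasing_by all_goals simp_all

def words_to_digits (seq : List String) : String :=
  PySem.Str.join "" (wordsToDigitsGo [] seq)

-- ===== PORT B =====
-- single forward pass with a pending multiplier (1 = none)
def wordsToDigitsAltGo (acc : List String) (mult : Nat) : List String → List String
  | [] => acc
  | t :: rest =>
    let tok := PySem.Str.lower t
    match NUM_WORD.get? tok with
    | some d => wordsToDigitsAltGo (acc ++ [strMul d mult]) 1 rest
    | none =>
      if mult == 1 && (tok == "double" || tok == "triple") then
        wordsToDigitsAltGo acc (if tok == "double" then 2 else 3) rest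
      else acc

def words_to_digits_alt (seq : List String) : String :=
  PySem.Str.join "" (wordsToDigitsAltGo [] 1 seq)

-- ===== PRECONDITION & SPEC =====
def Spec_words_to_digits (seq : List String) (out : String) : Prop := out = words_to_digits_alt seq
instance (seq : List String) (out : String) : Decidable (Spec_words_to_digits seq out) := by unfold Spec_words_to_digits; infer_instance

-- ===== CLAIM (what is proved, stated in full; the proofs are below) =====
def Claim_equal_words_to_digits : Prop := ∀ (seq : List String), Dom_words_to_digits seq → Spec_words_to_digits seq (words_to_digits seq)

-- ===== LEMMAS AND PROOFS =====
theorem strMul_one (s : String) : strMul s 1 = s := by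
  simp [strMul, PySem.Str.join]

theorem get?_mod_none {tok : String} (h : (tok == "double" || tok == "triple") = true) :
    NUM_WORD.get? tok = none := by
  rcases Bool.or_eq_true_iff.mp h with h' | h' <;> rw [eq_of_beq h'] <;> decide

theorem go_eq_aux : ∀ (n : Nat) (l : List String), l.length ≤ n →
    ∀ acc, wordsToDigitsGo acc l = wordsToDigitsAltGo acc 1 l := by
  intro n
  induction n with
  | zero =>
    intro l hl acc
    match l with
    | [] => rw [wordsToDigitsGo.eq_def]; simp [wordsToDigitsAltGo]
  | succ n ih =>
    intro l hl acc
    match l with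
    | [] => rw [wordsToDigitsGo.eq_def]; simp [wordsToDigitsAltGo]
    | t :: rest =>
      by_cases hmod : (PySem.Str.lower t == "double" || PySem.Str.lower t == "triple") = true
      · have htokN := get?_mod_none hmod
        match rest with
        | [] =>
          rw [wordsToDigitsGo.eq_def]
          simp [wordsToDigitsAltGo, htokN, hmod]
        | nxt0 :: rest2 =>
          cases hnxt : NUM_WORD.get? (PySem.Str.lower nxt0) with
          | some d =>
            rw [wordsToDigitsGo.eq_def]
            simp [wordsToDigitsAltGo, htokN, hmod, hnxt]
            exact ih rest2 (by simp only [List.length_cons] at hl; omega) _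
          | none =>
            rw [wordsToDigitsGo.eq_def]
            simp [wordsToDigitsAltGo, htokN, hmod, hnxt]
            by_cases hdt : PySem.Str.lower t = "double" <;> simp [hdt]
      · cases htok : NUM_WORD.get? (PySem.Str.lower t) with
        | some d =>
          rw [wordsToDigitsGo.eq_def]
          simp [wordsToDigitsAltGo, htok, hmod, strMul_one]
          exact ih rest (by simp only [List.length_cons] at hl; omega) _
        | none =>
          rw [wordsToDigitsGo.eq_def]
          simp [wordsToDigitsAltGo, htok, hmod]

theorem go_eq (acc : List String) (l : List String) :
    wordsToDigitsGo acc l = wordsToDigitsAltGo acc 1 l :=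
  go_eq_aux l.length l le_rfl acc

-- ===== VERDICT (by name: the statement is the Claim_ definition above) =====
theorem words_to_digits_spec : Claim_equal_words_to_digits := by
  intro seq _
  unfold Spec_words_to_digits words_to_digits words_to_digits_alt
  rw [go_eq]
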